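-- pv_equiv track=rewrite | github.com/Stabbles1/advent_of_code_2023 | day_1/main_p2.py | spelled_check
-- ===== SOURCE A (Python) =====
-- def spelled_check(line: str) -> None | str:
--     spelled_numbers = {
--         "one": "1",
--         "two": "2",
--         "three": "3",
--         "four": "4",
--         "five": "5",
--         "six": "6",
--         "seven": "7",
--         "eight": "8",
--         "nine": "9",
--     }
--     for spelled_number in spelled_numbers.keys():
--         if line[0 : len(spelled_number)] == spelled_number:
--             return spelled_numbers[spelled_number]
-- ===== SOURCE B (Python) =====
-- def spelled_check(line: str) -> None | str:
--     # Dispatch on the first character (a hand-rolled trie), checking only the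
--     # words that can still match, instead of scanning all nine words.
--     c = line[:1]
--     if c == "o":
--         return "1" if line[1:3] == "ne" else None
--     if c == "t":
--         if line[1:3] == "wo":
--             return "2"
--         if line[1:5] == "hree":
--             return "3"
--         return None
--     if c == "f":
--         if line[1:4] == "our":
--             return "4"
--         if line[1:4] == "ive":
--             return "5"
--         return None
--     if c == "s":
--         if line[1:3] == "ix":
--             return "6"
--         if line[1:5] == "even":
--             return "7"
--         return None
--     if c == "e":
--         return "8" if line[1:5] == "ight" else None
--     if c == "n":
--         return "9" if line[1:4] == "ine" else None
--     return None
-- ===== Notes on version B (the rewrite author's own statement) =====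
-- stated objective: alternative
-- what changed: Replaced the loop over all nine spelled words with prefix-slice comparison and dict lookup by a first-character trie dispatch that compares only the remaining tail of the candidate word(s).
import Mathlib
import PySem

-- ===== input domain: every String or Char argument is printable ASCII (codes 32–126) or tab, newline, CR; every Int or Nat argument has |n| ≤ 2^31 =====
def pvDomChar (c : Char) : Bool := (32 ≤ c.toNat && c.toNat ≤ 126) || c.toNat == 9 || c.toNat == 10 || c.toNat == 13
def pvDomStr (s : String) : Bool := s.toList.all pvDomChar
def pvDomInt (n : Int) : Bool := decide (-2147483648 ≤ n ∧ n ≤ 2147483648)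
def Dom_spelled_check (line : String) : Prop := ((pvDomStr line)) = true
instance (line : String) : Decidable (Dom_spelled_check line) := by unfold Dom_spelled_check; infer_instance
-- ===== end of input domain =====

-- B replaces A's loop over all nine spelled words by a first-character trie dispatch (objective: alternative).

-- ===== PORT A =====
-- the dict's items in insertion order; A iterates keys() and looks up d[w],
-- which for the matching key w is exactly the paired value v
def spelledWords : List (String × String) :=
  [("one", "1"), ("two", "2"), ("three", "3"), ("four", "4"), ("five", "5"),
   ("six", "6"), ("seven", "7"), ("eight", "8"), ("nine", "9")]

def spelledLoop (line : String) : List (String × String) → Option String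
  | [] => none
  | (w, v) :: rest =>
    if PySem.Str.slice line (some 0) (some ((PySem.Str.len w : Int))) = w then some v
    else spelledLoop line rest

def spelled_check (line : String) : Option String :=
  spelledLoop line spelledWords

-- ===== PORT B =====
def spelled_check_alt (line : String) : Option String :=
  let c := PySem.Str.slice line none (some 1)
  if c = "o" then
    if PySem.Str.slice line (some 1) (some 3) = "ne" then some "1" else none
  else if c = "t" then
    if PySem.Str.slice line (some 1) (some 3) = "wo" then some "2"
    else if PySem.Str.slice line (some 1) (some 5) = "hree" then some "3"
    else none
  else if c = "f" then
    if PySem.Str.slice line (some 1) (some 4) = "our" then some "4"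
    else if PySem.Str.slice line (some 1) (some 4) = "ive" then some "5"
    else none
  else if c = "s" then
    if PySem.Str.slice line (some 1) (some 3) = "ix" then some "6"
    else if PySem.Str.slice line (some 1) (some 5) = "even" then some "7"
    else none
  else if c = "e" then
    if PySem.Str.slice line (some 1) (some 5) = "ight" then some "8" else none
  else if c = "n" then
    if PySem.Str.slice line (some 1) (some 4) = "ine" then some "9" else none
  else none

-- ===== PRECONDITION & SPEC =====
def Spec_spelled_check (line : String) (out : Option String) : Prop := out = spelled_check_alt line
instance (line : String) (out : Option String) : Decidable (Spec_spelled_check line out) := by unfold Spec_spelled_check; infer_instance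

-- ===== CLAIM (what is proved, stated in full; the proofs are below) =====
def Claim_equal_spelled_check : Prop := ∀ (line : String), Dom_spelled_check line → Spec_spelled_check line (spelled_check line)

-- ===== LEMMAS AND PROOFS =====
set_option maxHeartbeats 4000000 in
theorem spelled_main (line : String) : spelled_check line = spelled_check_alt line := by
  simp only [spelled_check, spelled_check_alt, spelledLoop, spelledWords, String.ext_iff,
    PySem.Str.toList_slice, PySem.Chars.slice_eq_listSlice, PySem.List.slice_zero_start]
  rw [show (PySem.Str.len "one") = ((3:Nat):Int) from by decide,
      show (PySem.Str.len "two") = ((3:Nat):Int) from by decide,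
      show (PySem.Str.len "three") = ((5:Nat):Int) from by decide,
      show (PySem.Str.len "four") = ((4:Nat):Int) from by decide,
      show (PySem.Str.len "five") = ((4:Nat):Int) from by decide,
      show (PySem.Str.len "six") = ((3:Nat):Int) from by decide,
      show (PySem.Str.len "seven") = ((5:Nat):Int) from by decide,
      show (PySem.Str.len "eight") = ((5:Nat):Int) from by decide,
      show (PySem.Str.len "nine") = ((4:Nat):Int) from by decide]
  rw [show ((1:Int)) = ((1:Nat):Int) from rfl, show ((3:Int)) = ((3:Nat):Int) from rfl,
      show ((4:Int)) = ((4:Nat):Int) from rfl, show ((5:Int)) = ((5:Nat):Int) from rfl]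
  simp only [PySem.List.slice_to_natCast, PySem.List.slice_natCast]
  rw [show "one".toList = ['o','n','e'] from by decide,
      show "two".toList = ['t','w','o'] from by decide,
      show "three".toList = ['t','h','r','e','e'] from by decide,
      show "four".toList = ['f','o','u','r'] from by decide,
      show "five".toList = ['f','i','v','e'] from by decide,
      show "six".toList = ['s','i','x'] from by decide,
      show "seven".toList = ['s','e','v','e','n'] from by decide,
      show "eight".toList = ['e','i','g','h','t'] from by decide,
      show "nine".toList = ['n','i','n','e'] from by decide,
      show "o".toList = ['o'] from by decide,
      show "ne".toList = ['n','e'] from by decide,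
      show "t".toList = ['t'] from by decide,
      show "wo".toList = ['w','o'] from by decide,
      show "hree".toList = ['h','r','e','e'] from by decide,
      show "f".toList = ['f'] from by decide,
      show "our".toList = ['o','u','r'] from by decide,
      show "ive".toList = ['i','v','e'] from by decide,
      show "s".toList = ['s'] from by decide,
      show "ix".toList = ['i','x'] from by decide,
      show "even".toList = ['e','v','e','n'] from by decide,
      show "e".toList = ['e'] from by decide,
      show "ight".toList = ['i','g','h','t'] from by decide,
      show "n".toList = ['n'] from by decide,
      show "ine".toList = ['i','n','e'] from by decide]
  generalize line.toList = l
  obtain _ | ⟨a, _ | ⟨b, _ | ⟨c, _ | ⟨d, _ | ⟨e, l⟩⟩⟩⟩⟩ := l <;>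
    simp [List.take, List.drop] <;> split_ifs <;> simp_all

-- ===== VERDICT (by name: the statement is the Claim_ definition above) =====
theorem spelled_check_spec : Claim_equal_spelled_check := by
  intro line _
  exact spelled_main line
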